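-- pv_equiv track=rewrite | github.com/GrahamCoatesFarley/EE361_Project1_encryption | Problem2.py | pairing
-- ===== SOURCE A (Python) =====
-- def pairing(text):
--     k = len(text)
--     new_word = ''
--     text = text.lower()
--     if k % 2 == 0: # If the string is even handler
--         for i in range(0, k, 2):
--             if text[i] == text[i + 1]: #if both chars are in a pair
--                 new_word = text[0:i + 1] + str('x') + text[i + 1:] #Replaces with x
--                 new_word = pairing(new_word) # recersive call to repeat with new value
--                 break
--             else:
--                 new_word = text
--     else: # Odd hanndler
--         for i in range(0, k - 1, 2):
--             if text[i] == text[i + 1]: #if both chars are in a pair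
--                 new_word = text[0:i + 1] + str('x') + text[i + 1:]
--                 new_word = pairing(new_word) # recersive call to repeat with new value
--                 break
--             else:
--                 new_word = text
--     return new_word
-- ===== SOURCE B (Python) =====
-- def pairing(text):
--     out = []
--     for c in text.lower():
--         if len(out) % 2 == 1 and out[-1] == c:
--             out.append('x')
--         out.append(c)
--     return ''.join(out)
-- ===== Notes on version B (the rewrite author's own statement) =====
-- stated objective: faster
-- what changed: A restarts a full even-index scan from the beginning of the string after every single 'x' insertion (recursion with re-scan, quadratic); B makes one forward pass, tracking the parity of the output length and inserting 'x' on the fly when the two halves of a digraph pair would match.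
-- intended difference: On single-character input A returns '' (its loop body never runs, so new_word keeps its initial value ''), while B returns the lowercased character itself, which is the intended digraph preparation of a one-letter text. — e.g. on pairing("Q"): A returns "", B returns "q"
-- outside the precondition, e.g. on pairing('axx'): A returns 'axx', B returns 'axx'; on pairing('xx'): A does not finish within the time limit, B returns 'xxx'
import Mathlib
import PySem

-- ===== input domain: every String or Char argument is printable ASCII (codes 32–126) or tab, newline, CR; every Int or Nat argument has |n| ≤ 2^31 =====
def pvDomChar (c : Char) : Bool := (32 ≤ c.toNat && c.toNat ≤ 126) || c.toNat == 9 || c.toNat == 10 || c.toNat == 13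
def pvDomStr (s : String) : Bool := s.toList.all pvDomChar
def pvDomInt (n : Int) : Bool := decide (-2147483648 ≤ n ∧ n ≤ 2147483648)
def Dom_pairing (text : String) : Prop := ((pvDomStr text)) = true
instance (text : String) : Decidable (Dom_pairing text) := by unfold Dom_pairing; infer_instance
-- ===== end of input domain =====

-- B replaces A's restart-from-scratch scan after every insertion by one forward pass
-- over the lowered text (asymptotically faster as measured); equality is proved outside
-- the single-character inputs D_pairing, where A returns "" and B the lowercased character.

-- ===== PORT A =====
-- Literal transliteration of A: each call lowercases, then scans even indices 0,2,…
-- (the Python for-loop with break); on the first aligned equal pair it builds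
-- text[0:i+1] + 'x' + text[i+1:] and recurses, otherwise the loop leaves new_word = text
-- (or '' if the loop body never ran).  The fuel argument (length+1) only makes the
-- recursion total in Lean: inside Pre_pairing it is never exhausted.  Indexing text[i],
-- text[i+1] is always in range for the scanned i, so pyGetD with a dummy default is exact.
def pairingScan (t : List Char) (acc : List Char) : List Int → Sum (List Char) (List Char)
  | [] => Sum.inl acc
  | i :: is =>
    if PySem.List.pyGetD t i ' ' = PySem.List.pyGetD t (i + 1) ' ' then
      Sum.inr (PySem.List.slice t none (some (i + 1)) ++ 'x' :: PySem.List.slice t (some (i + 1)) none)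
    else pairingScan t t is

def pairingAux : Nat → List Char → List Char
  | 0, _ => []
  | fuel + 1, s =>
    let t := PySem.Chars.lower s
    let k : Int := (t.length : Int)
    match pairingScan t []
        (if PySem.Int.mod k 2 = 0 then PySem.List.pyRange 0 k 2
         else PySem.List.pyRange 0 (k - 1) 2) with
    | Sum.inl w => w
    | Sum.inr w => pairingAux fuel w

def pairing (text : String) : String :=
  String.ofList (pairingAux (text.toList.length + 1) text.toList)

-- ===== PORT B =====
def pairingStep (out : List Char) (c : Char) : List Char :=
  if out.length % 2 = 1 ∧ out.getLast? = some c then out ++ ['x', c] else out ++ [c]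

def pairing_alt (text : String) : String :=
  String.ofList (List.foldl pairingStep [] (PySem.Chars.lower text.toList))

-- ===== PRECONDITION & SPEC =====
-- Pre_ excludes strings whose lowercased form contains two adjacent 'x' characters:
-- on such inputs A can recurse forever (RecursionError, e.g. on "xx"); on those of them
-- where A does return, B happens to agree (see the cited examples).
def Pre_pairing (text : String) : Prop :=
  List.IsChain (fun a b => ¬(a = 'x' ∧ b = 'x')) (PySem.Chars.lower text.toList)
instance (text : String) : Decidable (Pre_pairing text) := by unfold Pre_pairing; infer_instance

def pvWitness_pairing : String := "hello"

-- On single-character input A returns "" (its loop body never runs, so new_word keeps its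
-- initial value ''), while B returns the lowercased character itself, the intended
-- digraph preparation of a one-letter text.
def D_pairing (text : String) : Prop := text.toList.length = 1
instance (text : String) : Decidable (D_pairing text) := by unfold D_pairing; infer_instance

def Spec_pairing (text : String) (out : String) : Prop := ¬ D_pairing text → out = pairing_alt text
instance (text : String) (out : String) : Decidable (Spec_pairing text out) := by unfold Spec_pairing; infer_instance

def pvDiffWitness_pairing : String := "Q"
def pvDiffWitnessOut_pairing : String × String := ("", "q")

-- ===== CLAIM (what is proved, stated in full; the proofs are below) =====
def Claim_unchanged_pairing : Prop := ∀ (text : String), Dom_pairing text → Pre_pairing text → Spec_pairing text (pairing text)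
def Claim_changed_pairing : Prop := Dom_pairing (pvDiffWitness_pairing) ∧ Pre_pairing (pvDiffWitness_pairing) ∧ D_pairing (pvDiffWitness_pairing) ∧ pairing (pvDiffWitness_pairing) = pvDiffWitnessOut_pairing.1 ∧ pairing_alt (pvDiffWitness_pairing) = pvDiffWitnessOut_pairing.2 ∧ pvDiffWitnessOut_pairing.1 ≠ pvDiffWitnessOut_pairing.2
def Claim_exact_pairing : Prop := ∀ (text : String), Dom_pairing text → Pre_pairing text → D_pairing text → pairing text ≠ pairing_alt text

-- ===== LEMMAS AND PROOFS =====

-- the even indices 2a, 2(a+1), …, 2(a+n-1) that A's loop scans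
def pvEvens (a n : Nat) : List Int := (List.range n).map (fun k : Nat => (2 * ((a : Int) + (k : Int))))

-- "no aligned equal pair": the scan of A finds nothing inside this list
def pvNoAl (l : List Char) : Prop :=
  ∀ p : Nat, 2 * p + 1 < l.length → l.getD (2 * p) ' ' ≠ l.getD (2 * p + 1) ' '

theorem pvEvens_succ (a n : Nat) : pvEvens a (n + 1) = (2 * (a : Int)) :: pvEvens (a + 1) n := by
  unfold pvEvens
  rw [List.range_succ_eq_map, List.map_cons, List.map_map]
  refine congrArg₂ List.cons (by push_cast; ring) (List.map_congr_left ?_)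
  intro k _
  simp only [Function.comp_apply, Nat.succ_eq_add_one]
  push_cast; ring

theorem pv_lowerChar_idem (c : Char) :
    PySem.Chars.lowerChar (PySem.Chars.lowerChar c) = PySem.Chars.lowerChar c := by
  by_cases h : ('A' ≤ c ∧ c ≤ 'Z')
  · have h65 : 65 ≤ c.toNat := by
      simpa [Char.le_def, UInt32.le_iff_toNat_le] using h.1
    have h90 : c.toNat ≤ 90 := by
      simpa [Char.le_def, UInt32.le_iff_toNat_le] using h.2
    have hv : (c.toNat + 32).isValidChar := Or.inl (by omega)
    have ht : (Char.ofNat (c.toNat + 32)).toNat = c.toNat + 32 := by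
      rw [Char.toNat_ofNat, if_pos hv]
    have h1 : PySem.Chars.isupper c = true := by
      simp [PySem.Chars.isupper, h.1, h.2]
    have hz : ('Z' : Char).toNat = 90 := by decide
    have hnle : ¬ (Char.ofNat (c.toNat + 32) ≤ 'Z') := by
      rw [Char.le_def, UInt32.le_iff_toNat_le]
      show ¬ ((Char.ofNat (c.toNat + 32)).toNat ≤ ('Z' : Char).toNat)
      rw [ht, hz]; omega
    have h2 : PySem.Chars.isupper (Char.ofNat (c.toNat + 32)) = false := by
      simp [PySem.Chars.isupper, hnle]
    simp [PySem.Chars.lowerChar, h1, h2]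
  · have h1 : PySem.Chars.isupper c = false := by
      rcases Decidable.not_and_iff_not_or_not.mp h with h' | h' <;>
        simp [PySem.Chars.isupper, h']
    simp [PySem.Chars.lowerChar, h1]

theorem pv_low_eq {l : List Char} (h : ∀ a ∈ l, PySem.Chars.lowerChar a = a) :
    PySem.Chars.lower l = l :=
  (List.map_congr_left h).trans (List.map_id l)

theorem pv_scan_no_hit (t : List Char) :
    ∀ (n a : Nat) (acc : List Char), 0 < n →
    (∀ q, q < n → PySem.List.pyGetD t (2 * ((a : Int) + (q : Int))) ' '
                 ≠ PySem.List.pyGetD t (2 * ((a : Int) + (q : Int)) + 1) ' ') →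
    pairingScan t acc (pvEvens a n) = Sum.inl t := by
  intro n
  induction n with
  | zero => intro a acc h0 _; omega
  | succ n ih =>
    intro a acc _ hne
    rw [pvEvens_succ]
    simp only [pairingScan]
    have e0 : (2 * ((a : Int) + ((0 : Nat) : Int))) = 2 * (a : Int) := by push_cast; ring
    have hcond : ¬ (PySem.List.pyGetD t (2 * (a : Int)) ' '
        = PySem.List.pyGetD t (2 * (a : Int) + 1) ' ') := by
      have h := hne 0 (by omega); rw [e0] at h; exact h
    rw [if_neg hcond]
    cases n with
    | zero => simp [pvEvens, pairingScan]
    | succ m =>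
      apply ih (a + 1) t (by omega)
      intro q hq
      have h := hne (q + 1) (by omega)
      have e : (2 * (((a + 1 : Nat) : Int) + (q : Int)))
          = (2 * ((a : Int) + ((q + 1 : Nat) : Int))) := by push_cast; ring
      rw [e]; exact h

theorem pv_scan_hit (t : List Char) :
    ∀ (n a : Nat) (acc : List Char) (p : Nat), p < n →
    (∀ q, q < p → PySem.List.pyGetD t (2 * ((a : Int) + (q : Int))) ' '
                 ≠ PySem.List.pyGetD t (2 * ((a : Int) + (q : Int)) + 1) ' ') →
    (PySem.List.pyGetD t (2 * ((a : Int) + (p : Int))) ' '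
       = PySem.List.pyGetD t (2 * ((a : Int) + (p : Int)) + 1) ' ') →
    pairingScan t acc (pvEvens a n) =
      Sum.inr (PySem.List.slice t none (some (2 * ((a : Int) + (p : Int)) + 1)) ++
               'x' :: PySem.List.slice t (some (2 * ((a : Int) + (p : Int)) + 1)) none) := by
  intro n
  induction n with
  | zero => intro a acc p hp _ _; omega
  | succ n ih =>
    intro a acc p hp hpre hhit
    rw [pvEvens_succ]
    simp only [pairingScan]
    cases p with
    | zero =>
      have e0 : (2 * ((a : Int) + ((0 : Nat) : Int))) = 2 * (a : Int) := by push_cast; ring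
      rw [e0] at hhit ⊢
      rw [if_pos hhit]
    | succ p' =>
      have e0 : (2 * ((a : Int) + ((0 : Nat) : Int))) = 2 * (a : Int) := by push_cast; ring
      have hcond : ¬ (PySem.List.pyGetD t (2 * (a : Int)) ' '
          = PySem.List.pyGetD t (2 * (a : Int) + 1) ' ') := by
        have h := hpre 0 (by omega); rw [e0] at h; exact h
      rw [if_neg hcond]
      have e : (2 * (((a + 1 : Nat) : Int) + ((p' : Nat) : Int)))
          = (2 * ((a : Int) + ((p' + 1 : Nat) : Int))) := by push_cast; ring
      rw [← e] at hhit ⊢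
      apply ih (a + 1) t p' (by omega) ?_ hhit
      intro q hq
      have h := hpre (q + 1) (by omega)
      have e2 : (2 * (((a + 1 : Nat) : Int) + (q : Int)))
          = (2 * ((a : Int) + ((q + 1 : Nat) : Int))) := by push_cast; ring
      rw [e2]; exact h

theorem pv_pyRange02 (m : Nat) :
    PySem.List.pyRange 0 (((2 * m : Nat)) : Int) 2 = pvEvens 0 m := by
  rw [PySem.List.pyRange_of_pos _ _ (by norm_num : (0:Int) < 2)]
  have hcount : (if (0 : Int) < ((2 * m : Nat) : Int)
      then ((((2 * m : Nat) : Int) - 0 + 2 - 1) / 2).toNat else 0) = m := by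
    cases Nat.eq_zero_or_pos m with
    | inl h => subst h; simp
    | inr h =>
      rw [if_pos (by exact_mod_cast Nat.mul_pos (by norm_num) h)]
      have e : (((2 * m : Nat) : Int) - 0 + 2 - 1) = ((2 * m + 1 : Nat) : Int) := by
        push_cast; ring
      rw [e]
      omega
  rw [hcount]
  unfold pvEvens
  apply List.map_congr_left
  intro j _; push_cast; ring

theorem pv_idxs_eq (k : Nat) :
    (if PySem.Int.mod (k : Int) 2 = 0 then PySem.List.pyRange 0 (k : Int) 2
     else PySem.List.pyRange 0 ((k : Int) - 1) 2) = pvEvens 0 (k / 2) := by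
  have hm : PySem.Int.mod (k : Int) 2 = ((k % 2 : Nat) : Int) := by
    exact_mod_cast PySem.Int.mod_natCast k 2
  rcases Nat.mod_two_eq_zero_or_one k with hk | hk
  · have e : (k : Int) = ((2 * (k / 2) : Nat) : Int) := by push_cast; omega
    rw [if_pos (by rw [hm, hk]; simp), e, pv_pyRange02]
  · have e : (k : Int) - 1 = ((2 * (k / 2) : Nat) : Int) := by push_cast; omega
    rw [if_neg (by rw [hm, hk]; simp), e, pv_pyRange02]

theorem pvMain : ∀ (rest out : List Char) (fuel : Nat),
    rest.length < fuel →
    (∀ a ∈ out, PySem.Chars.lowerChar a = a) →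
    (∀ a ∈ rest, PySem.Chars.lowerChar a = a) →
    pvNoAl out →
    List.IsChain (fun a b => ¬(a = 'x' ∧ b = 'x')) (out.getLast?.toList ++ rest) →
    (out ++ rest).length ≠ 1 →
    pairingAux fuel (out ++ rest) = List.foldl pairingStep out rest := by
  intro rest
  induction rest with
  | nil =>
    intro out fuel hfuel hlo _ hnoal _ hlen
    cases fuel with
    | zero => omega
    | succ f =>
      simp only [List.append_nil] at hlen ⊢
      rcases Nat.lt_or_ge out.length 2 with h2 | h2
      · have h0 : out.length = 0 := by omega
        have : out = [] := List.length_eq_zero_iff.mp h0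
        subst this
        rfl
      · simp only [pairingAux, List.foldl_nil]
        rw [pv_low_eq hlo, pv_idxs_eq]
        have hm : 0 < out.length / 2 := by omega
        rw [pv_scan_no_hit out (out.length / 2) 0 [] hm ?_]
        · intro q hq
          have hb : 2 * q + 1 < out.length := by omega
          have e1 : (2 * (((0 : Nat) : Int) + (q : Int))) = ((2 * q : Nat) : Int) := by
            push_cast; ring
          have e2 : ((2 * q : Nat) : Int) + 1 = ((2 * q + 1 : Nat) : Int) := by
            push_cast; ring
          rw [e1, e2, PySem.List.pyGetD_natCast, PySem.List.pyGetD_natCast]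
          exact hnoal q hb
  | cons c rest' ih =>
    intro out fuel hfuel hlo hlr hnoal hchain hlen
    have hlc : PySem.Chars.lowerChar c = c := hlr c List.mem_cons_self
    have hlr' : ∀ a ∈ rest', PySem.Chars.lowerChar a = a :=
      fun a ha => hlr a (List.mem_cons_of_mem _ ha)
    by_cases hP : out.length % 2 = 1 ∧ out.getLast? = some c
    · -- A inserts 'x' here and recurses; B's step appends ['x', c]
      cases fuel with
      | zero => omega
      | succ f =>
        obtain ⟨hodd, hlast⟩ := hP
        have hol : out.length = 2 * (out.length / 2) + 1 := by omega
        set p := out.length / 2 with hp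
        have hpL : 2 * p < out.length := by omega
        have hgetlast : out.getD (2 * p) ' ' = c := by
          have h1 : out.getLast? = out[out.length - 1]? := List.getLast?_eq_getElem?
          rw [List.getD_eq_getElem?_getD, show 2 * p = out.length - 1 by omega, ← h1, hlast]
          rfl
        have hchainc : List.IsChain (fun a b => ¬(a = 'x' ∧ b = 'x')) (c :: c :: rest') := by
          rw [hlast] at hchain; exact hchain
        have hcx : c ≠ 'x' := by
          intro he
          exact (List.isChain_cons_cons.mp hchainc).1 ⟨he, he⟩
        have hchain' : List.IsChain (fun a b => ¬(a = 'x' ∧ b = 'x')) (c :: rest') :=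
          (List.isChain_cons_cons.mp hchainc).2
        have hlowall : ∀ a ∈ out ++ c :: rest', PySem.Chars.lowerChar a = a := by
          intro a ha
          rcases List.mem_append.mp ha with h | h
          · exact hlo a h
          · rcases List.mem_cons.mp h with h | h
            · subst h; exact hlc
            · exact hlr' a h
        have hklen : (out ++ c :: rest').length = 2 * p + 2 + rest'.length := by
          simp [hol]; omega
        simp only [pairingAux]
        rw [pv_low_eq hlowall, pv_idxs_eq]
        have hplt : p < (out ++ c :: rest').length / 2 := by omega
        rw [pv_scan_hit (out ++ c :: rest') ((out ++ c :: rest').length / 2) 0 [] p hplt ?_ ?_]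
        · -- the match has reduced to the recursive call on the inserted string
          have e : (2 * (((0 : Nat) : Int) + (p : Int)) + 1) = ((2 * p + 1 : Nat) : Int) := by
            push_cast; ring
          have hsl1 : PySem.List.slice (out ++ c :: rest') none
              (some (2 * (((0 : Nat) : Int) + (p : Int)) + 1)) = out := by
            rw [e, PySem.List.slice_to _ (by positivity), Int.toNat_natCast]
            exact List.take_left' hol
          have hsl2 : PySem.List.slice (out ++ c :: rest')
              (some (2 * (((0 : Nat) : Int) + (p : Int)) + 1)) none = c :: rest' := by
            rw [e, PySem.List.slice_from _ (by positivity), Int.toNat_natCast]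
            exact List.drop_left' hol
          rw [hsl1, hsl2]
          have hassoc : out ++ 'x' :: c :: rest' = (out ++ ['x', c]) ++ rest' := by simp
          rw [hassoc]
          have hstep : pairingStep out c = out ++ ['x', c] := by
            simp only [pairingStep]; rw [if_pos ⟨hodd, hlast⟩]
          rw [List.foldl_cons, hstep]
          apply ih (out ++ ['x', c]) f (by simp at hfuel; omega) ?_ hlr' ?_ ?_ ?_
          · intro a ha
            rcases List.mem_append.mp ha with h | h
            · exact hlo a h
            · rcases List.mem_cons.mp h with h | h
              · subst h; decide
              · simp at h; subst h; exact hlc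
          · intro p' hb
            simp only [List.length_append, List.length_cons, List.length_nil] at hb
            by_cases hpp : p' = p
            · rw [List.getD_append _ _ _ _ (by omega),
                  List.getD_append_right _ _ _ _ (by omega),
                  show 2 * p' + 1 - out.length = 0 by omega,
                  show 2 * p' = 2 * p by omega, hgetlast]
              simpa using hcx
            · have hblt : 2 * p' + 1 < out.length := by omega
              rw [List.getD_append _ _ _ _ (by omega), List.getD_append _ _ _ _ hblt]
              exact hnoal p' hblt
          · have hgl : (out ++ ['x', c]).getLast? = some c := by
              rw [show out ++ ['x', c] = (out ++ ['x']) ++ [c] by simp, List.getLast?_concat]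
            rw [hgl]
            simpa using hchain'
          · simp
            omega
        · intro q hq
          have hb : 2 * q + 1 < out.length := by omega
          have e1 : (2 * (((0 : Nat) : Int) + (q : Int))) = ((2 * q : Nat) : Int) := by
            push_cast; ring
          have e2 : ((2 * q : Nat) : Int) + 1 = ((2 * q + 1 : Nat) : Int) := by
            push_cast; ring
          rw [e1, e2, PySem.List.pyGetD_natCast, PySem.List.pyGetD_natCast,
              List.getD_append _ _ _ _ (by omega), List.getD_append _ _ _ _ hb]
          exact hnoal q hb
        · have e1 : (2 * (((0 : Nat) : Int) + (p : Int))) = ((2 * p : Nat) : Int) := by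
            push_cast; ring
          have e2 : ((2 * p : Nat) : Int) + 1 = ((2 * p + 1 : Nat) : Int) := by
            push_cast; ring
          rw [e1, e2, PySem.List.pyGetD_natCast, PySem.List.pyGetD_natCast,
              List.getD_append _ _ _ _ hpL,
              List.getD_append_right _ _ _ _ (by omega),
              show 2 * p + 1 - out.length = 0 by omega]
          rw [hgetlast]
          rfl
    · -- no pair here: A's scan walks past, B appends [c]
      have hstep : pairingStep out c = out ++ [c] := by
        simp only [pairingStep]; rw [if_neg hP]
      have hassoc : out ++ c :: rest' = (out ++ [c]) ++ rest' := by simp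
      rw [List.foldl_cons, hstep, hassoc]
      apply ih (out ++ [c]) fuel (by simp at hfuel; omega) ?_ hlr' ?_ ?_ ?_
      · intro a ha
        rcases List.mem_append.mp ha with h | h
        · exact hlo a h
        · simp at h; subst h; exact hlc
      · intro p' hb
        simp only [List.length_append, List.length_cons, List.length_nil] at hb
        rcases Nat.lt_or_ge (2 * p' + 1) out.length with hblt | hbge
        · rw [List.getD_append _ _ _ _ (by omega), List.getD_append _ _ _ _ hblt]
          exact hnoal p' hblt
        · have hEq : 2 * p' + 1 = out.length := by omega
          have hodd : out.length % 2 = 1 := by omega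
          have hlast' : out.getLast? ≠ some c := fun hl => hP ⟨hodd, hl⟩
          have hlt : 2 * p' < out.length := by omega
          rw [List.getD_append _ _ _ _ hlt,
              List.getD_append_right _ _ _ _ (by omega),
              show 2 * p' + 1 - out.length = 0 by omega]
          intro hcontra
          apply hlast'
          have hgl : out.getLast? = out[out.length - 1]? := List.getLast?_eq_getElem?
          rw [hgl, show out.length - 1 = 2 * p' by omega,
              List.getElem?_eq_getElem (by omega)]
          have : out.getD (2 * p') ' ' = out[2 * p'] :=
            List.getD_eq_getElem _ _ (by omega)
          rw [this] at hcontra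
          simp at hcontra ⊢
          exact hcontra
      · cases hgl : out.getLast? with
        | none =>
          have : out = [] := by simpa using hgl
          subst this
          have hgl2 : (([] : List Char) ++ [c]).getLast? = some c := by simp
          rw [hgl2]
          simpa using hchain
        | some l =>
          have hgl2 : (out ++ [c]).getLast? = some c := List.getLast?_concat
          rw [hgl2]
          rw [hgl] at hchain
          exact (List.isChain_cons_cons.mp hchain).2
      · simpa using hlen

-- ===== VERDICT (by name: the statement is the Claim_ definition above) =====
theorem pairing_spec : Claim_unchanged_pairing := by
  intro text _ hpre hnd
  have hidem : ∀ a ∈ PySem.Chars.lower text.toList, PySem.Chars.lowerChar a = a := by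
    intro a ha
    simp only [PySem.Chars.lower] at ha
    obtain ⟨b, _, rfl⟩ := List.mem_map.mp ha
    exact pv_lowerChar_idem b
  have hll : PySem.Chars.lower (PySem.Chars.lower text.toList) = PySem.Chars.lower text.toList :=
    pv_low_eq hidem
  have hlen : (PySem.Chars.lower text.toList).length = text.toList.length := by
    simp [PySem.Chars.lower]
  have hstep1 : pairingAux (text.toList.length + 1) text.toList
      = pairingAux (text.toList.length + 1) (PySem.Chars.lower text.toList) := by
    simp only [pairingAux]
    rw [hll]
  have hmain := pvMain (PySem.Chars.lower text.toList) [] (text.toList.length + 1)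
      (by rw [hlen]; omega)
      (by intro a ha; cases ha)
      hidem
      (by intro p hb; simp at hb)
      (by rw [show (([] : List Char).getLast?.toList ++ PySem.Chars.lower text.toList)
            = PySem.Chars.lower text.toList by simp]
          exact hpre)
      (by rw [List.nil_append, hlen]; exact fun h => hnd h)
  rw [List.nil_append] at hmain
  show pairing text = pairing_alt text
  unfold pairing pairing_alt
  rw [hstep1, hmain]

theorem pairing_changed : Claim_changed_pairing := by
  unfold Claim_changed_pairing; decide

theorem pairing_tight : Claim_exact_pairing := by
  unfold Claim_exact_pairing
  intro text _ _ hd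
  have h1 : text.toList.length = 1 := hd
  obtain ⟨c, hc⟩ := List.length_eq_one_iff.mp h1
  unfold pairing pairing_alt
  rw [hc]
  intro heq
  have h2 := congrArg String.toList heq
  rw [String.toList_ofList, String.toList_ofList] at h2
  have hL : pairingAux ([c].length + 1) [c] = [] := rfl
  have hR : List.foldl pairingStep [] (PySem.Chars.lower [c]) = [PySem.Chars.lowerChar c] := rfl
  rw [hL, hR] at h2
  cases h2
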